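-- pv_equiv track=rewrite | github.com/mayank3135432/recreational-programming-stuff | Algorithms/greedy_algorithms/smallsubgreatsum.py | minSubset
-- ===== SOURCE A (Python) =====
-- def minSubset(A):
--     num = 0
--     numma = 0
--     while(1):
--         numma += max(A)
--         num += 1
--         A.remove(max(A))
--         if(sum(A)<numma):
--             return num
-- ===== SOURCE B (Python) =====
-- def minSubset(A):
--     # Alternative: sort descending once, accumulate a prefix sum until it exceeds the rest.
--     # Does NOT mutate A (the original empties part of its argument in place).
--     total = sum(A)
--     acc = 0
--     for count, x in enumerate(sorted(A, reverse=True), 1):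
--         acc += x
--         if total - acc < acc:
--             return count
-- ===== Notes on version B (the rewrite author's own statement) =====
-- stated objective: alternative
-- what changed: Instead of repeatedly scanning the list for its max and removing it in place, B sorts descending once and scans prefix sums against the total; B also does not mutate its argument.
import Mathlib
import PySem

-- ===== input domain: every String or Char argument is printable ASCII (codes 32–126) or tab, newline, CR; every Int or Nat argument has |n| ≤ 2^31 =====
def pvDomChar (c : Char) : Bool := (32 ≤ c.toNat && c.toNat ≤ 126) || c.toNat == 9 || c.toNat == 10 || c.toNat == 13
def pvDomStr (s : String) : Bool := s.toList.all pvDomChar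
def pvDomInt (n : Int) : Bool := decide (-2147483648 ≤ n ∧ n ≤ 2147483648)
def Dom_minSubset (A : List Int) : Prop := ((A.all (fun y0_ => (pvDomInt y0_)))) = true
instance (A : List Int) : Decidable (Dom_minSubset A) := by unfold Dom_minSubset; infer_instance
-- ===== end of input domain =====

-- B sorts descending once and scans prefix sums instead of A's repeated max-scan-and-remove
-- (an alternative single-sort algorithm); equivalence is about the RETURN value only: Python A
-- empties part of its argument in place, B does not mutate it.

-- ===== PORT A =====
-- A's while(1) loop: numma += max(A); num += 1; A.remove(max(A)); if sum(A) < numma: return num.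
-- max([]) raises ValueError (none branch): unreachable under Pre_, port returns 0 there.
def minSubsetLoop (A : List Int) (num numma : Int) : Int :=
  match _hm : PySem.List.max? A (fun x => x) with
  | none => 0  -- ValueError from max([]); outside Pre_
  | some m =>
    let numma' := numma + m
    let num' := num + 1
    match _hr : PySem.List.remove? A m with
    | none => 0  -- unreachable: m ∈ A
    | some A' =>
      if A'.sum < numma' then num' else minSubsetLoop A' num' numma'
termination_by A.length
decreasing_by
  have hmem : m ∈ A := PySem.List.max?_mem _hm
  have : A' = A.erase m := by
    have := PySem.List.remove?_eq_some_erase (xs := A) (v := m) hmem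
    rw [_hr] at this; exact (Option.some_inj.mp this)
  subst this
  have h1 : (A.erase m).length = A.length - 1 := by simp [hmem]
  have h2 := List.length_pos_of_mem hmem
  omega

def minSubset (A : List Int) : Int := minSubsetLoop A 0 0

-- ===== PORT B =====
-- B's for-loop over sorted(A, reverse=True) with enumerate count and running prefix sum acc.
-- Falling off the loop Python returns None: outside Pre_, port returns 0 there.
def minSubsetAltLoop (s : List Int) (total acc count : Int) : Int :=
  match s with
  | [] => 0  -- Python B returns None here; outside Pre_
  | x :: rest =>
    let acc' := acc + x
    let count' := count + 1
    if total - acc' < acc' then count' else minSubsetAltLoop rest total acc' count'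

def minSubset_alt (A : List Int) : Int :=
  minSubsetAltLoop (PySem.List.sorted A (fun x => x) true) A.sum 0 0

-- ===== PRECONDITION & SPEC =====
-- Pre_ excludes exactly the inputs on which Python A raises ValueError (max of the emptied
-- list): those where no descending-sorted prefix sum exceeds the sum of the rest.
def Pre_minSubset (A : List Int) : Prop :=
  ∃ k ∈ List.range A.length,
    A.sum < 2 * ((PySem.List.sorted A (fun x => x) true).take (k + 1)).sum
instance (A : List Int) : Decidable (Pre_minSubset A) := by unfold Pre_minSubset; infer_instance

def pvWitness_minSubset : List Int := ([1, 2, 3])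

def Spec_minSubset (A : List Int) (out : Int) : Prop := out = minSubset_alt A
instance (A : List Int) (out : Int) : Decidable (Spec_minSubset A out) := by unfold Spec_minSubset; infer_instance

-- ===== CLAIM (what is proved, stated in full; the proofs are below) =====
def Claim_equal_minSubset : Prop := ∀ (A : List Int), Dom_minSubset A → Pre_minSubset A → Spec_minSubset A (minSubset A)

-- ===== LEMMAS AND PROOFS =====

-- one unfolding step of A's loop when the list is nonempty (max exists)
theorem minSubsetLoop_eq (A : List Int) (m : Int)
    (hm : PySem.List.max? A (fun y => y) = some m) (num numma : Int) :
    minSubsetLoop A num numma =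
      if (A.erase m).sum < numma + m then num + 1
      else minSubsetLoop (A.erase m) (num + 1) (numma + m) := by
  rw [minSubsetLoop]
  split
  · simp_all
  · next m₂ hm₂ =>
    rw [hm] at hm₂
    obtain rfl : m = m₂ := (Option.some_inj.mp hm₂)
    have hmem : m ∈ A := PySem.List.max?_mem hm
    split
    · next hr => exact absurd hmem ((PySem.List.remove?_eq_none_iff A m).mp hr)
    · next A' hr =>
      have he := PySem.List.remove?_eq_some_erase A m hmem
      rw [hr] at he
      obtain rfl : A' = A.erase m := Option.some_inj.mp he
      rfl

-- A's loop never returns on the empty list (Python raises ValueError there); the port yields 0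
theorem minSubsetLoop_nil (num numma : Int) : minSubsetLoop [] num numma = 0 := by
  rw [minSubsetLoop]
  rfl

-- A's loop depends only on the multiset of its list argument.
theorem minSubsetLoop_perm (A B : List Int) (h : A.Perm B) (num numma : Int) :
    minSubsetLoop A num numma = minSubsetLoop B num numma := by
  cases hA : PySem.List.max? A (fun y => y) with
  | none =>
    obtain rfl : A = [] := (PySem.List.max?_eq_none_iff A _).mp hA
    obtain rfl : B = [] := h.symm.eq_nil
    rfl
  | some m =>
    have hmemA : m ∈ A := PySem.List.max?_mem hA
    cases hB : PySem.List.max? B (fun y => y) with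
    | none =>
      obtain rfl : B = [] := (PySem.List.max?_eq_none_iff B _).mp hB
      obtain rfl : A = [] := h.eq_nil
      cases hmemA
    | some m' =>
      have h1 : m' ≤ m := PySem.List.max?_isMax hA m' (h.mem_iff.mpr (PySem.List.max?_mem hB))
      have h2 : m ≤ m' := PySem.List.max?_isMax hB m (h.mem_iff.mp hmemA)
      have hmm : m' = m := le_antisymm h1 h2
      rw [hmm] at hB
      rw [minSubsetLoop_eq A m hA num numma, minSubsetLoop_eq B m hB num numma]
      have hp : (A.erase m).Perm (B.erase m) := h.erase m
      rw [hp.sum_eq]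
      split_ifs with hc
      · rfl
      · exact minSubsetLoop_perm (A.erase m) (B.erase m) hp (num + 1) (numma + m)
termination_by A.length
decreasing_by
  have h1 : (A.erase m).length = A.length - 1 := by simp [hmemA]
  have h2 := List.length_pos_of_mem hmemA
  omega

-- foldl max over a list of elements all ≤ x stays x
theorem foldl_max_of_le (t : List Int) (x : Int) (h : ∀ y ∈ t, y ≤ x) :
    t.foldl max x = x := by
  induction t with
  | nil => rfl
  | cons a t ih =>
    simp only [List.foldl_cons]
    have : max x a = x := max_eq_left (h a (by simp))
    rw [this]
    exact ih (fun y hy => h y (by simp [hy]))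

-- On a descending list, A's loop and B's loop take the same path.
theorem loops_agree (L : List Int) (hL : L.Pairwise (fun a b => b ≤ a))
    (num acc total : Int) (htot : total = acc + L.sum) :
    minSubsetLoop L num acc = minSubsetAltLoop L total acc num := by
  induction L generalizing num acc with
  | nil => rw [minSubsetLoop_nil, minSubsetAltLoop]
  | cons x t ih =>
    obtain ⟨h1, h2⟩ := List.pairwise_cons.mp hL
    have hm : PySem.List.max? (x :: t) (fun y => y) = some x := by
      rw [PySem.List.max?_id_cons, foldl_max_of_le t x h1]
    rw [minSubsetLoop_eq _ x hm, List.erase_cons_head, minSubsetAltLoop]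
    have hsub : total - (acc + x) = t.sum := by rw [htot, List.sum_cons]; ring
    simp only [hsub]
    split_ifs with hc
    · rfl
    · exact ih h2 (num + 1) (acc + x) (by rw [htot, List.sum_cons]; ring)

-- ===== VERDICT (by name: the statement is the Claim_ definition above) =====
theorem minSubset_spec : Claim_equal_minSubset := by
  intro A _ _
  unfold Spec_minSubset minSubset minSubset_alt
  have hperm : A.Perm (PySem.List.sorted A (fun x => x) true) :=
    (PySem.List.sorted_perm (xs := A) (key := fun x => x) (rev := true)).symm
  have hsum : A.sum = (PySem.List.sorted A (fun x => x) true).sum := hperm.sum_eq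
  rw [minSubsetLoop_perm A _ hperm 0 0,
      loops_agree _ (PySem.List.sorted_pairwise_rev A (fun x => x)) 0 0 A.sum (by omega)]
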